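-- pv_equiv track=rewrite | github.com/bbu654/FreeCell-RoughDraft | fc_game/myfcv0001.py | findNoOf0Cols
-- ===== SOURCE A (Python) =====
-- BLANKCARD = ''
--
-- def findNoOf0Cols(tablow):
--     blankcolumns=0; first0Col=-1
--     EMPTYCOL=[BLANKCARD for idxs in range(len(tablow)-1)]
--     colv = list(zip(*tablow))
--
--     for idc,colu in enumerate(colv):    #        all0=True
--         colo = []
--         for valk in colu[1:]:
--             colo.append(valk)
--         if colo == EMPTYCOL:            #for ids,colt in enumerate(colu[1:]):            #    if colt == ':            #        all0=False            #        break            #if all0: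
--             blankcolumns+=1
--             if first0Col == -1:
--                 first0Col = idc
--     return blankcolumns, first0Col
-- ===== SOURCE B (Python) =====
-- def findNoOf0Cols(tablow):
--     # Single row-major pass maintaining per-column blank flags (no transpose).
--     if not tablow:
--         return 0, -1
--     ncols = min(len(r) for r in tablow)
--     blank = [True] * ncols
--     for row in tablow[1:]:
--         for c in range(ncols):
--             if row[c] != '':
--                 blank[c] = False
--     blankcolumns = sum(blank)
--     first0Col = next((c for c, v in enumerate(blank) if v), -1)
--     return blankcolumns, first0Col
-- ===== Notes on version B (the rewrite author's own statement) =====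
-- stated objective: alternative
-- what changed: A transposes the table with zip(*tablow) and compares each column's tail against a prebuilt all-blank template list; B never transposes: it makes one row-major pass over tablow[1:] maintaining per-column boolean blank flags, then counts and finds the first surviving flag.
import Mathlib
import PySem

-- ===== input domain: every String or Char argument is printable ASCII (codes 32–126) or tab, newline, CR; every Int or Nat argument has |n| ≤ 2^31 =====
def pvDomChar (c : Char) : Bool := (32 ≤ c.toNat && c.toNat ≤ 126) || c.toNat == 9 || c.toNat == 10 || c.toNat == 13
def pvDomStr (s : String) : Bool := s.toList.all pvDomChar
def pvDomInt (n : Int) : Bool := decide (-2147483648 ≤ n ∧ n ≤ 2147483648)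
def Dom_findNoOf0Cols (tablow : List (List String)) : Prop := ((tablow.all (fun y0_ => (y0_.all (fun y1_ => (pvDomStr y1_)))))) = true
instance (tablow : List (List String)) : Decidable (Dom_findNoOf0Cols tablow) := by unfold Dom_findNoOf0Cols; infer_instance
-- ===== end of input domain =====

-- B replaces A's transpose-then-compare-to-a-blank-template with a single row-major
-- pass maintaining per-column blank flags (objective: alternative decomposition, same cost).

-- ===== PORT A =====
-- zip(*tablow): column c (for every c below the minimum row length) is [row[c] for row in tablow];
-- exact: every getD index used is below every row's length, and min? is none only for tablow = [].
def pyZipStarStr (rows : List (List String)) : List (List String) :=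
  (List.range (((rows.map List.length).min?).getD 0)).map
    (fun c => rows.map (fun r => r.getD c ""))

def findNoOf0Cols (tablow : List (List String)) : Int × Int :=
  let EMPTYCOL : List String := (List.range (tablow.length - 1)).map (fun _ => "")
  let colv := pyZipStarStr tablow
  (PySem.List.enumerate colv 0).foldl
    (fun (acc : Int × Int) p =>
      let colo := (PySem.List.slice p.2 (some 1) none).foldl
        (fun l v => l ++ [v]) ([] : List String)
      if colo = EMPTYCOL then
        (acc.1 + 1, if acc.2 = -1 then p.1 else acc.2)
      else acc)
    (0, -1)

-- ===== PORT B =====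
def findNoOf0Cols_alt (tablow : List (List String)) : Int × Int :=
  match tablow with
  | [] => (0, -1)
  | r0 :: rest =>
    let ncols := rest.foldl (fun m r => min m r.length) r0.length
    let blank := rest.foldl
      (fun bl row => (List.range ncols).foldl
        (fun bl c => if row.getD c "" ≠ "" then bl.set c false else bl) bl)
      (List.replicate ncols true)
    let blankcolumns : Int := blank.count true
    let first0Col : Int :=
      match blank.idxOf? true with
      | some c => (c : Int)
      | none => -1
    (blankcolumns, first0Col)


-- ===== PRECONDITION & SPEC =====
def Spec_findNoOf0Cols (tablow : List (List String)) (out : Int × Int) : Prop := out = findNoOf0Cols_alt tablow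
instance (tablow : List (List String)) (out : Int × Int) : Decidable (Spec_findNoOf0Cols tablow out) := by unfold Spec_findNoOf0Cols; infer_instance

-- ===== CLAIM (what is proved, stated in full; the proofs are below) =====
def Claim_equal_findNoOf0Cols : Prop := ∀ (tablow : List (List String)), Dom_findNoOf0Cols tablow → Spec_findNoOf0Cols tablow (findNoOf0Cols tablow)

-- ===== LEMMAS AND PROOFS =====

theorem foldl_app_singleton {α : Type} (l acc : List α) :
    l.foldl (fun a v => a ++ [v]) acc = acc ++ l := by
  induction l generalizing acc with
  | nil => simp
  | cons x t ih => simp [List.foldl, ih]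

theorem enumerate_map_range' {α : Type} (g : Nat → α) :
    ∀ (n k : Nat), PySem.List.enumerate ((List.range' k n).map g) (k : Int)
      = (List.range' k n).map (fun c : Nat => ((c : Int), g c)) := by
  intro n
  induction n with
  | zero => intro k; simp [PySem.List.enumerate]
  | succ m ih =>
    intro k
    rw [List.range'_succ]
    simp only [List.map_cons, PySem.List.enumerate_cons]
    have h1 : ((k : Int) + 1) = ((k + 1 : Nat) : Int) := by push_cast; ring
    rw [h1, ih (k + 1)]

theorem enumerate_map_range {α : Type} (g : Nat → α) (n : Nat) :
    PySem.List.enumerate ((List.range n).map g) 0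
      = (List.range n).map (fun c : Nat => ((c : Int), g c)) := by
  rw [List.range_eq_range', show (0 : Int) = ((0 : Nat) : Int) by simp,
    enumerate_map_range' g n 0]

theorem foldl_count_first (P : Nat → Prop) [DecidablePred P] :
    ∀ (cs : List Nat) (bc f0 : Int),
      cs.foldl (fun (acc : Int × Int) c =>
          if P c then (acc.1 + 1, if acc.2 = -1 then (c : Int) else acc.2) else acc)
        (bc, f0)
      = (bc + ((cs.filter (fun c => decide (P c))).length : Int),
         if f0 = -1 then
           (match (cs.filter (fun c => decide (P c))).head? with
            | some c => (c : Int)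
            | none => -1)
         else f0) := by
  intro cs
  induction cs with
  | nil => intro bc f0; simp
  | cons c t ih =>
    intro bc f0
    by_cases hc : P c
    · simp only [List.foldl_cons, if_pos hc, List.filter_cons, decide_eq_true hc]
      rw [ih]
      by_cases hf : f0 = -1
      · have hcne : ((c : Int)) ≠ -1 := by omega
        simp [hf, hcne]
        ring
      · simp [hf]
        ring
    · simp only [List.foldl_cons, if_neg hc, List.filter_cons]
      rw [ih]
      simp [hc]

theorem foldSet_length (f : Nat → String) :
    ∀ (cs : List Nat) (b : List Bool),
      (cs.foldl (fun bl c => if f c ≠ "" then bl.set c false else bl) b).length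
        = b.length := by
  intro cs
  induction cs with
  | nil => intro b; rfl
  | cons c t ih =>
    intro b
    simp only [List.foldl_cons]
    rw [ih]
    split <;> simp

theorem foldSet_get (f : Nat → String) :
    ∀ (cs : List Nat) (b : List Bool) (c : Nat) (h : c < b.length),
      (cs.foldl (fun bl c => if f c ≠ "" then bl.set c false else bl) b)[c]'(by
          rw [foldSet_length]; exact h)
        = if c ∈ cs then (b[c] && (f c == "")) else b[c] := by
  intro cs
  induction cs with
  | nil => intro b c h; simp
  | cons c' t ih =>
    intro b c h
    by_cases hrow : f c' = ""
    · simp only [List.foldl_cons, hrow, ne_eq, not_true_eq_false, if_false]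
      rw [ih _ _ h]
      by_cases hcc : c = c'
      · subst hcc
        have hbeq : (f c == "") = true := by simp [hrow]
        by_cases hmem : c ∈ t <;> simp [hmem, hbeq]
      · simp [hcc]
    · simp only [List.foldl_cons, ne_eq, hrow, not_false_eq_true, if_true]
      have hlen : (b.set c' false).length = b.length := by simp
      rw [ih _ _ (by omega)]
      by_cases hcc : c = c'
      · subst hcc
        have hbeq : (f c == "") = false := by simp [hrow]
        by_cases hmem : c ∈ t <;>
          simp [hmem, hbeq, List.getElem_set]
      · have hset : (b.set c' false)[c]'(by omega) = b[c] := by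
          rw [List.getElem_set]; simp [Ne.symm hcc]
        by_cases hmem : c ∈ t <;> simp [hmem, hcc, hset]

theorem foldRows_length (n : Nat) :
    ∀ (rs : List (List String)) (b : List Bool),
      (rs.foldl (fun bl row => (List.range n).foldl
          (fun bl c => if row.getD c "" ≠ "" then bl.set c false else bl) bl) b).length
        = b.length := by
  intro rs
  induction rs with
  | nil => intro b; rfl
  | cons r t ih =>
    intro b
    simp only [List.foldl_cons]
    rw [ih, foldSet_length (fun c => r.getD c "")]

theorem foldRows_get (n : Nat) :
    ∀ (rs : List (List String)) (b : List Bool) (hb : b.length = n)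
      (c : Nat) (h : c < n),
      (rs.foldl (fun bl row => (List.range n).foldl
          (fun bl c => if row.getD c "" ≠ "" then bl.set c false else bl) bl) b)[c]'(by
            rw [foldRows_length]; omega)
        = ((b[c]'(by omega)) && rs.all (fun r => r.getD c "" == "")) := by
  intro rs
  induction rs with
  | nil => intro b hb c h; simp
  | cons r t ih =>
    intro b hb c h
    simp only [List.foldl_cons]
    have hlen : ((List.range n).foldl
        (fun bl c => if r.getD c "" ≠ "" then bl.set c false else bl) b).length = n := by
      rw [foldSet_length (fun c => r.getD c "")]; exact hb
    rw [ih _ hlen c h]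
    have hone := foldSet_get (fun c => r.getD c "") (List.range n) b c (by omega)
    simp only [List.mem_range, h, if_true] at hone
    rw [hone]
    simp [Bool.and_assoc]

theorem idxOf_map_range' (p : Nat → Bool) :
    ∀ (n k : Nat), ((List.range' k n).map p).idxOf? true
      = (((List.range' k n).filter p).head?).map (fun c => c - k) := by
  intro n
  induction n with
  | zero => intro k; simp [List.idxOf?]
  | succ m ih =>
    intro k
    rw [List.range'_succ]
    simp only [List.map_cons, List.filter_cons]
    by_cases hp : p k = true
    · simp [List.idxOf?, List.findIdx?_cons, hp]
    · have hpf : p k = false := by simpa using hp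
      simp only [hpf, Bool.false_eq_true, if_false]
      have lhs : ((false :: (List.range' (k+1) m).map p).idxOf? true)
          = (((List.range' (k+1) m).map p).idxOf? true).map (· + 1) := by
        simp [List.idxOf?, List.findIdx?_cons]
      rw [lhs, ih (k+1)]
      cases hh : ((List.range' (k+1) m).filter p).head? with
      | none => simp [hh]
      | some c =>
        have hc : c ∈ (List.range' (k+1) m).filter p := List.mem_of_mem_head? hh
        have hc2 : c ∈ List.range' (k+1) m := List.mem_of_mem_filter hc
        have hkc : k + 1 ≤ c := (List.mem_range'_1.mp hc2).1
        have h2 : c - (k+1) + 1 = c - k := by omega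
        simp [hh, h2]

theorem min_lengths (r0 : List String) (rest : List (List String)) :
    (((r0 :: rest).map List.length).min?).getD 0
      = rest.foldl (fun m r => min m r.length) r0.length := by
  rw [List.map_cons, List.min?_cons']
  simp [List.foldl_map]

theorem main_cons (r0 : List String) (rest : List (List String)) :
    findNoOf0Cols (r0 :: rest) = findNoOf0Cols_alt (r0 :: rest) := by
  -- shared notation
  have hn := min_lengths r0 rest
  set n := rest.foldl (fun m r => min m r.length) r0.length with hndef
  set p : Nat → Bool := fun c => rest.all (fun r => r.getD c "" == "") with hpdef
  -- B side
  have hBblank :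
      rest.foldl (fun bl row => (List.range n).foldl
          (fun bl c => if row.getD c "" ≠ "" then bl.set c false else bl) bl)
        (List.replicate n true) = (List.range n).map p := by
    apply List.ext_getElem
    · rw [foldRows_length]; simp
    · intro c h1 h2
      have hlt : c < n := by
        rw [foldRows_length, List.length_replicate] at h1
        exact h1
      rw [foldRows_get n rest (List.replicate n true) (by simp) c hlt]
      simp [hpdef]
  have hB : findNoOf0Cols_alt (r0 :: rest)
      = ((((List.range n).filter p).length : Int),
         match ((List.range n).filter p).head? with
         | some c => (c : Int)
         | none => -1) := by
    have hcount : ((List.range n).map p).count true = ((List.range n).filter p).length := by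
      simp [List.count, List.countP_map, List.countP_eq_length_filter, List.filter_map, Function.comp_def]
    have hidx : (((List.range n).map p).idxOf? true) = ((List.range n).filter p).head? := by
      rw [List.range_eq_range', idxOf_map_range' p n 0]
      simp
    simp only [findNoOf0Cols_alt]
    rw [hBblank, hcount, hidx]
  -- A side
  have hcolo : ∀ (xs : List String),
      (PySem.List.slice xs (some 1) none).foldl (fun l v => l ++ [v]) ([] : List String)
        = xs.tail := by
    intro xs
    rw [foldl_app_singleton, PySem.List.slice_from_one]
    simp
  have hEMP : (List.range ((r0 :: rest : List (List String)).length - 1)).map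
      (fun _ => ("" : String)) = List.replicate rest.length "" := by
    simp [List.map_const']
  have hA : findNoOf0Cols (r0 :: rest)
      = (((((List.range n).filter (fun c => decide
              (rest.map (fun r => r.getD c "") = List.replicate rest.length ""))).length : Nat) : Int),
         match ((List.range n).filter (fun c => decide
              (rest.map (fun r => r.getD c "") = List.replicate rest.length ""))).head? with
         | some c => (c : Int)
         | none => -1) := by
    simp only [findNoOf0Cols, pyZipStarStr]
    rw [hn, enumerate_map_range, List.foldl_map]
    simp only [hcolo, List.map_cons, List.tail_cons, hEMP]
    rw [foldl_count_first
      (fun c => rest.map (fun r => r.getD c "") = List.replicate rest.length "")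
      (List.range n) 0 (-1)]
    simp
  have hfilt : (List.range n).filter (fun c => decide
        (rest.map (fun r => r.getD c "") = List.replicate rest.length ""))
      = (List.range n).filter p := by
    apply List.filter_congr
    intro c _
    rw [Bool.eq_iff_iff]
    simp [hpdef, List.eq_replicate_iff, List.all_eq_true]
  rw [hA, hB, hfilt]

-- ===== VERDICT (by name: the statement is the Claim_ definition above) =====
theorem findNoOf0Cols_spec : Claim_equal_findNoOf0Cols := by
  intro tablow _
  unfold Spec_findNoOf0Cols
  match tablow with
  | [] => decide
  | r0 :: rest => exact main_cons r0 rest
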